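-- pv_equiv track=rewrite | github.com/curv-institute/curv-cot-harness | scripts/run_baseline.py | pairwise_agreement
-- ===== SOURCE A (Python) =====
-- def pairwise_agreement(answers: list[str]) -> tuple[int, int]:
--     """Returns (agree_pairs, total_pairs) for a list of normalized answers."""
--     n = len(answers)
--     total = 0
--     agree = 0
--     for i in range(n):
--         for j in range(i + 1, n):
--             total += 1
--             if answers[i] == answers[j]:
--                 agree += 1
--     return agree, total
-- ===== SOURCE B (Python) =====
-- def pairwise_agreement(answers: list[str]) -> tuple[int, int]:
--     """Returns (agree_pairs, total_pairs) for a list of normalized answers."""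
--     counts = {}
--     for a in answers:
--         counts[a] = counts.get(a, 0) + 1
--     agree = 0
--     for c in counts.values():
--         agree += c * (c - 1) // 2
--     n = len(answers)
--     return agree, n * (n - 1) // 2
-- ===== Notes on version B (the rewrite author's own statement) =====
-- stated objective: faster
-- what changed: Replaced the O(n^2) double loop over index pairs with one frequency-counting pass and closed forms: agree = sum of C(count,2) over the counter values, total = C(n,2).
import Mathlib
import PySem

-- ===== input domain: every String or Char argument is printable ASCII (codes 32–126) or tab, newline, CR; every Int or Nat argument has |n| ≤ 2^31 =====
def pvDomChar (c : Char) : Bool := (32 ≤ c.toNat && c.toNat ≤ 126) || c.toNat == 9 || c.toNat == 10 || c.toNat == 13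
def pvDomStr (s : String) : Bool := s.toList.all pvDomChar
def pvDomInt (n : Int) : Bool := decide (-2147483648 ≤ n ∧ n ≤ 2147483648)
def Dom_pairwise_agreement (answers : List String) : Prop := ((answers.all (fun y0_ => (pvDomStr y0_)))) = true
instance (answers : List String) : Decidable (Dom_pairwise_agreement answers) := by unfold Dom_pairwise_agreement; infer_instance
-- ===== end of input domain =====

-- B replaces A's double loop over index pairs with one frequency-counting pass and closed
-- forms: agree = sum of c*(c-1)//2 over the counter values, total = n*(n-1)//2.

-- ===== PORT A =====
def pairwise_agreement (answers : List String) : Int × Int :=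
  let n : Int := answers.length
  (PySem.List.pyRange 0 n 1).foldl
    (fun (st : Int × Int) i =>
      (PySem.List.pyRange (i + 1) n 1).foldl
        (fun (st : Int × Int) j =>
          (if PySem.List.pyGetD answers i "" == PySem.List.pyGetD answers j "" then st.1 + 1 else st.1,
           st.2 + 1))
        st)
    (0, 0)

-- ===== PORT B =====
def pairwise_agreement_alt (answers : List String) : Int × Int :=
  let counts : PySem.Dict String Int :=
    answers.foldl (fun d a => d.insert a (d.getD a 0 + 1)) PySem.Dict.empty
  let agree : Int :=
    counts.values.foldl (fun acc c => acc + PySem.Int.floordiv (c * (c - 1)) 2) 0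
  let n : Int := answers.length
  (agree, PySem.Int.floordiv (n * (n - 1)) 2)

-- ===== PRECONDITION & SPEC =====
def Spec_pairwise_agreement (answers : List String) (out : Int × Int) : Prop := out = pairwise_agreement_alt answers
instance (answers : List String) (out : Int × Int) : Decidable (Spec_pairwise_agreement answers out) := by unfold Spec_pairwise_agreement; infer_instance

-- ===== CLAIM (what is proved, stated in full; the proofs are below) =====
def Claim_equal_pairwise_agreement : Prop := ∀ (answers : List String), Dom_pairwise_agreement answers → Spec_pairwise_agreement answers (pairwise_agreement answers)

-- ===== LEMMAS AND PROOFS =====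

/-- Agreeing pairs, counted front-to-back: each element against the tail after it. -/
def specAgree : List String → Int
  | [] => 0
  | x :: r => (r.count x : Int) + specAgree r

/-- C(c,2) as Python computes it: c*(c-1)//2. -/
def c2 (c : Int) : Int := PySem.Int.floordiv (c * (c - 1)) 2

lemma c2_succ (c : Int) : c2 (c + 1) = c2 c + c := by
  unfold c2
  rw [PySem.Int.floordiv_eq_ediv_of_pos (by norm_num),
      PySem.Int.floordiv_eq_ediv_of_pos (by norm_num)]
  have h : (c + 1) * ((c + 1) - 1) = c * (c - 1) + c * 2 := by ring
  rw [h, Int.add_mul_ediv_right _ _ (by norm_num)]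

lemma c2_zero : c2 0 = 0 := by decide
lemma c2_one : c2 1 = 0 := by decide

lemma countP_eq_count (x : String) (m : List String) :
    m.countP (fun y => x == y) = m.count x := by
  induction m with
  | nil => rfl
  | cons y t ih =>
    rw [List.countP_cons, List.count_cons, ih]
    by_cases h : x = y
    · subst h; simp
    · have h1 : (x == y) = false := by simp [h]
      have h2 : (y == x) = false := by simp; exact fun e => h e.symm
      simp [h1, h2]

lemma specAgree_append_singleton (l : List String) (x : String) :
    specAgree (l ++ [x]) = specAgree l + (l.count x : Int) := by
  induction l with
  | nil => simp [specAgree]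
  | cons y r ih =>
    simp only [List.cons_append, specAgree, ih, List.count_cons, List.count_append]
    by_cases h : x = y
    · subst h; simp; ring
    · have h1 : (y == x) = false := by simp; exact fun e => h e.symm
      have h2 : (x == y) = false := by simp [h]
      simp [h1, h2]; ring

/-- A's result, characterised: per-index tail counts and per-index tail lengths. -/
lemma A_char (l : List String) :
    pairwise_agreement l =
      (((List.range l.length).map (fun k => ((l.drop (k+1)).count (l.getD k "") : Int))).sum,
       ((List.range l.length).map (fun k => ((l.length - (k+1) : Nat) : Int))).sum) := by
  simp only [pairwise_agreement]
  have hinner : ∀ (st : Int × Int), ∀ i ∈ PySem.List.pyRange 0 (l.length : Int) 1,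
      (PySem.List.pyRange (i + 1) (l.length : Int) 1).foldl
        (fun (st : Int × Int) j =>
          (if PySem.List.pyGetD l i "" == PySem.List.pyGetD l j "" then st.1 + 1 else st.1,
           st.2 + 1)) st
      = (st.1 + ((l.drop (i + 1).toNat).count (PySem.List.pyGetD l i "") : Int),
         st.2 + ((((l.length : Int) - (i + 1)).toNat : Nat) : Int)) := by
    intro st i hi
    obtain ⟨st1, st2⟩ := st
    rw [PySem.List.foldl_prod_mk
        (f := fun a j => if PySem.List.pyGetD l i "" == PySem.List.pyGetD l j "" then a + 1 else a)
        (g := fun b _ => b + 1)]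
    have h0 : (0 : Int) ≤ i + 1 := by
      have := PySem.List.mem_pyRange_one.1 hi; omega
    have hmap : (PySem.List.pyRange (i + 1) (l.length : Int) 1).map
        (fun j => PySem.List.pyGetD l j "") = l.drop (i + 1).toNat := by
      simpa using PySem.List.map_pyGetD_pyRange l "" h0
    congr 1
    · rw [PySem.List.foldl_if_add_one]
      congr 1
      have hcp : (PySem.List.pyRange (i + 1) (l.length : Int) 1).countP
          (fun j => PySem.List.pyGetD l i "" == PySem.List.pyGetD l j "")
          = ((PySem.List.pyRange (i + 1) (l.length : Int) 1).map
              (fun j => PySem.List.pyGetD l j "")).countP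
            (fun y => PySem.List.pyGetD l i "" == y) := by
        rw [List.countP_map]; rfl
      rw [hcp, hmap, countP_eq_count]
    · rw [PySem.List.foldl_add _ (fun _ => (1 : Int))]
      rw [PySem.List.sum_map_const_int, PySem.List.length_pyRange_one, mul_one]
  rw [PySem.List.foldl_congr_mem _ _
      (fun (st : Int × Int) (i : Int) =>
        (st.1 + ((l.drop (i + 1).toNat).count (PySem.List.pyGetD l i "") : Int),
         st.2 + ((((l.length : Int) - (i + 1)).toNat : Nat) : Int))) _ hinner]
  rw [PySem.List.foldl_prod_mk
      (f := fun a i => a + ((l.drop (i + 1).toNat).count (PySem.List.pyGetD l i "") : Int))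
      (g := fun b i => b + ((((l.length : Int) - (i + 1)).toNat : Nat) : Int))]
  rw [PySem.List.foldl_add, PySem.List.foldl_add, zero_add, zero_add,
      PySem.List.pyRange_zero_nat l.length, List.map_map, List.map_map]
  congr 1
  · refine congrArg List.sum (List.map_congr_left ?_)
    intro k _
    have h1 : ((k : Int) + 1).toNat = k + 1 := by omega
    simp [Function.comp, h1]
  · refine congrArg List.sum (List.map_congr_left ?_)
    intro k _
    simp only [Function.comp]
    omega

lemma T1_eq (l : List String) :
    ((List.range l.length).map (fun k => ((l.drop (k+1)).count (l.getD k "") : Int))).sum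
      = specAgree l := by
  induction l with
  | nil => simp [specAgree]
  | cons x r ih =>
    rw [List.length_cons, List.range_succ_eq_map]
    simp only [List.map_cons, List.map_map, List.sum_cons]
    have ht : (List.range r.length).map
        ((fun k => (((x :: r).drop (k+1)).count ((x :: r).getD k "") : Int)) ∘ Nat.succ)
        = (List.range r.length).map (fun k => ((r.drop (k+1)).count (r.getD k "") : Int)) := by
      apply List.map_congr_left
      intro k _
      simp [List.drop_succ_cons]
    rw [ht, ih]
    simp [specAgree]

lemma T2_eq (m : Nat) :
    ((List.range m).map (fun k => ((m - (k+1) : Nat) : Int))).sum = c2 (m : Int) := by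
  induction m with
  | zero => simpa using c2_zero.symm
  | succ m ih =>
    rw [List.range_succ_eq_map]
    simp only [List.map_cons, List.map_map, List.sum_cons]
    have ht : (List.range m).map ((fun k => ((m + 1 - (k+1) : Nat) : Int)) ∘ Nat.succ)
        = (List.range m).map (fun k => ((m - (k+1) : Nat) : Int)) := by
      apply List.map_congr_left
      intro k _
      simp only [Function.comp]
      congr 1
      omega
    rw [ht, ih]
    rw [show ((m + 1 : Nat) : Int) = (m : Int) + 1 by push_cast; ring] at *
    rw [c2_succ]
    have hh : ((m + 1 - (0 + 1) : Nat) : Int) = (m : Int) := by omega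
    rw [hh]; ring

/-- B's result, characterised: sum of C(count,2) over the distinct elements, and C(n,2). -/
lemma B_char (l : List String) :
    pairwise_agreement_alt l =
      (((PySem.Set.ofList l).map (fun k => c2 ((l.count k : Int)))).sum,
       c2 (l.length : Int)) := by
  simp only [pairwise_agreement_alt]
  rw [PySem.Dict.foldl_insert_getD_add_one_eq_counter]
  rw [PySem.List.foldl_add _ (fun c => PySem.Int.floordiv (c * (c - 1)) 2), zero_add]
  rw [PySem.Dict.values_eq_map_keys _ (PySem.Dict.nodup_keys_counter l) 0]
  rw [PySem.Dict.keys_counter, List.map_map]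
  congr 1
  refine congrArg List.sum (List.map_congr_left ?_)
  intro k _
  simp [Function.comp, PySem.Dict.getD_counter, c2]

/-- Changing a summand at one member of a duplicate-free list shifts the sum by its delta. -/
lemma sum_map_shift (s : List String) (f g : String → Int) (x : String) (d : Int)
    (hnd : s.Nodup) (hx : x ∈ s)
    (hne : ∀ k ∈ s, k ≠ x → g k = f k) (hgx : g x = f x + d) :
    (s.map g).sum = (s.map f).sum + d := by
  induction s with
  | nil => cases hx
  | cons y t ih =>
    obtain ⟨hyt, hndt⟩ := List.nodup_cons.1 hnd
    simp only [List.map_cons, List.sum_cons]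
    rcases List.mem_cons.1 hx with h | h
    · subst h
      have ht : t.map g = t.map f := by
        apply List.map_congr_left
        intro k hk
        exact hne k (List.mem_cons_of_mem _ hk) (fun e => hyt (e ▸ hk))
      rw [ht, hgx]; ring
    · have hy : g y = f y := hne y (List.mem_cons_self) (fun e => hyt (e ▸ h))
      rw [hy, ih hndt h (fun k hk => hne k (List.mem_cons_of_mem _ hk))]
      ring

lemma ofList_sum_c2 (l : List String) :
    ((PySem.Set.ofList l).map (fun k => c2 ((l.count k : Int)))).sum = specAgree l := by
  induction l using List.reverseRecOn with
  | nil => rfl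
  | append_singleton l x ih =>
    have hset : PySem.Set.ofList (l ++ [x]) = (PySem.Set.ofList l).add x := by
      rw [PySem.Set.ofList_eq_foldl, List.foldl_append, ← PySem.Set.ofList_eq_foldl]
      rfl
    rw [specAgree_append_singleton, ← ih, hset]
    by_cases hx : x ∈ l
    · rw [PySem.Set.add_of_mem ((PySem.Set.mem_ofList l x).2 hx)]
      apply sum_map_shift _ _ _ x ((l.count x : Int))
        (PySem.Set.nodup_ofList l) ((PySem.Set.mem_ofList l x).2 hx)
      · intro k _ hk
        have : (l ++ [x]).count k = l.count k := by
          simp [List.count_append, List.count_cons]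
          exact fun e => hk e.symm
        rw [this]
      · have : (l ++ [x]).count x = l.count x + 1 := by
          simp [List.count_append]
        rw [this]
        push_cast
        rw [c2_succ]
    · rw [PySem.Set.add_of_not_mem (fun h => hx ((PySem.Set.mem_ofList l x).1 h))]
      rw [List.map_append, List.sum_append]
      have h1 : (PySem.Set.ofList l).map (fun k => c2 (((l ++ [x]).count k : Int)))
          = (PySem.Set.ofList l).map (fun k => c2 ((l.count k : Int))) := by
        apply List.map_congr_left
        intro k hk
        have hkx : k ≠ x := fun e => hx (e ▸ (PySem.Set.mem_ofList l k).1 hk)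
        have : (l ++ [x]).count k = l.count k := by
          simp [List.count_append, List.count_cons]
          exact fun e => hkx e.symm
        rw [this]
      have h2 : (l ++ [x]).count x = 1 := by
        simp [List.count_append, List.count_eq_zero_of_not_mem hx]
      have h3 : l.count x = 0 := List.count_eq_zero_of_not_mem hx
      rw [h1]
      simp [h3, c2_one]

-- ===== VERDICT (by name: the statement is the Claim_ definition above) =====
theorem pairwise_agreement_spec : Claim_equal_pairwise_agreement := by
  intro answers _
  unfold Spec_pairwise_agreement
  rw [A_char, B_char, T1_eq, T2_eq, ofList_sum_c2]
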